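-- pv_equiv track=rewrite | github.com/azraeltruthsay/gaia | gaia-core/gaia_core/cognition/sleep_task_scheduler.py | _check_facts
-- ===== SOURCE A (Python) =====
-- from typing import Any, Callable, Dict, List, Optional
--
-- def _check_facts(
--     facts: Dict[str, List[str]],
--     bp_text: str,
-- ) -> List[str]:
--     """Return list of facts not found in blueprint text."""
--     missing: List[str] = []
--     for category, items in facts.items():
--         for item in items:
--             # For enum members like GaiaState.ACTIVE, check the member name
--             if category == "enums":
--                 member = item.split(".")[-1]
--                 if member not in bp_text:
--                     missing.append(f"enum:{item}")
--             elif category == "endpoints":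
--                 # Check for the path portion (e.g., "/sleep/study-handoff")
--                 path = item.split(" ", 1)[1]
--                 if path not in bp_text:
--                     missing.append(f"endpoint:{item}")
--             elif category == "constants":
--                 if item not in bp_text:
--                     missing.append(f"constant:{item}")
--     return missing
-- ===== SOURCE B (Python) =====
-- def _check_facts(
--     facts,
--     bp_text,
-- ):
--     """Return list of facts not found in blueprint text."""
--     LABEL = {"enums": "enum:", "endpoints": "endpoint:", "constants": "constant:"}
--
--     def pattern(category, item):
--         if category == "enums":
--             return item.split(".")[-1]
--         if category == "endpoints":
--             return item.split(" ", 1)[1]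
--         return item
--
--     # Pass 1: flatten recognised categories into (label, item, search-pattern) triples.
--     triples = [
--         (LABEL[category], item, pattern(category, item))
--         for category, items in facts.items() if category in LABEL
--         for item in items
--     ]
--     # Pass 2: each distinct pattern is searched in bp_text exactly once, memoised.
--     found = {}
--     for _, _, pat in triples:
--         if pat not in found:
--             found[pat] = pat in bp_text
--     # Pass 3: rebuild the report in the original order.
--     return [label + item for label, item, pat in triples if not found[pat]]
-- ===== Notes on version B (the rewrite author's own statement) =====
-- stated objective: alternative
-- what changed: Replaces A's single nested loop with inline branch dispatch by a three-pass pipeline: a category table flattens facts into (label, item, pattern) triples, a memo dict runs each distinct pattern's substring search exactly once, and a final pass rebuilds the report in order.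
import Mathlib
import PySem

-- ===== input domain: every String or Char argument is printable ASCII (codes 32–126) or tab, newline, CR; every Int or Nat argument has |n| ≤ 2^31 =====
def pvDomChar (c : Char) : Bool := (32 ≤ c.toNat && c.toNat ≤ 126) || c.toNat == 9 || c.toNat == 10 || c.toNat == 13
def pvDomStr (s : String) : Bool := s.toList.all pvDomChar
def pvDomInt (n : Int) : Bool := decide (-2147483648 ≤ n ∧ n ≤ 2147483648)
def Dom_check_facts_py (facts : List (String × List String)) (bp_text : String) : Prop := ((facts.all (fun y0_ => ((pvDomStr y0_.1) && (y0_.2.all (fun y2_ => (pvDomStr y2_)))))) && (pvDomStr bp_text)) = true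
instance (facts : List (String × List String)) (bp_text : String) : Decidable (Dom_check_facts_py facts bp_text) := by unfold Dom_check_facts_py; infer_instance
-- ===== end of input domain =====

-- B replaces A's per-item branch-dispatch loop by a three-pass pipeline (label-table flatten,
-- memoised substring tests, rebuild); same results, each distinct pattern searched once.


-- ===== PORT A =====
-- A-side helper: the body of A's inner loop (the branch chain), factored for readability
def pvAStep (bp_text c : String) (missing : List String) (item : String) : List String :=
  if c == "enums" then
    -- item.split(".")[-1]; split never returns [], so the none branch is unreachable
    match PySem.List.pyGet? ((PySem.Str.split? item ".").getD []) (-1) with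
    | some member =>
        if PySem.Str.isIn member bp_text then missing else missing ++ ["enum:" ++ item]
    | none => missing
  else if c == "endpoints" then
    -- item.split(" ", 1)[1]; none = IndexError (no space in item), excluded by Pre_
    match PySem.List.pyGet? ((PySem.Str.splitMax? item " " 1).getD []) 1 with
    | some path =>
        if PySem.Str.isIn path bp_text then missing else missing ++ ["endpoint:" ++ item]
    | none => missing
  else if c == "constants" then
    if PySem.Str.isIn item bp_text then missing else missing ++ ["constant:" ++ item]
  else missing

def check_facts_py (facts : List (String × List String)) (bp_text : String) : List String :=
  facts.foldl (fun missing ci => ci.2.foldl (pvAStep bp_text ci.1) missing) []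

-- ===== PORT B =====
-- the LABEL table of Source B
def pvLabelOf (category : String) : Option String :=
  if category == "enums" then some "enum:"
  else if category == "endpoints" then some "endpoint:"
  else if category == "constants" then some "constant:"
  else none

-- Source B's pattern(category, item); the .getD "" arms are where the Python raises (outside Pre_)
def pvPatternOf (category item : String) : String :=
  if category == "enums" then (PySem.List.pyGet? (((PySem.Str.split? item ".").getD [])) (-1)).getD ""
  else if category == "endpoints" then (PySem.List.pyGet? ((PySem.Str.splitMax? item " " 1).getD []) 1).getD ""
  else item

def check_facts_py_alt (facts : List (String × List String)) (bp_text : String) : List String :=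
  -- pass 1: triples
  let triples := facts.flatMap (fun ci =>
    match pvLabelOf ci.1 with
    | some label => ci.2.map (fun item => (label, item, pvPatternOf ci.1 item))
    | none => [])
  -- pass 2: memoised membership tests (every pattern of a triple ends up as a key)
  let found := triples.foldl (fun d t =>
    if (d.get? t.2.2).isSome then d
    else d.insert t.2.2 (PySem.Str.isIn t.2.2 bp_text)) PySem.Dict.empty
  -- pass 3: rebuild (the key is always present; the default is never used)
  triples.filterMap (fun t =>
    if found.getD t.2.2 true = false then some (t.1 ++ t.2.1) else none)

-- ===== PRECONDITION & SPEC =====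
-- Pre_ excludes exactly the inputs on which Python A raises IndexError:
-- an item in an "endpoints" category containing no space (item.split(" ", 1)[1] fails).
def Pre_check_facts_py (facts : List (String × List String)) (bp_text : String) : Prop :=
  ∀ p ∈ facts, p.1 = "endpoints" → ∀ it ∈ p.2, PySem.Str.isIn " " it = true
instance (facts : List (String × List String)) (bp_text : String) : Decidable (Pre_check_facts_py facts bp_text) := by unfold Pre_check_facts_py; infer_instance

def pvWitness_check_facts_py : (List (String × List String)) × String :=
  ([("enums", ["GaiaState.ACTIVE"]), ("endpoints", ["GET /sleep"]), ("constants", ["X9"])],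
   "ACTIVE and /sleep")

def Spec_check_facts_py (facts : List (String × List String)) (bp_text : String) (out : List String) : Prop := out = check_facts_py_alt facts bp_text
instance (facts : List (String × List String)) (bp_text : String) (out : List String) : Decidable (Spec_check_facts_py facts bp_text out) := by unfold Spec_check_facts_py; infer_instance

-- ===== CLAIM (what is proved, stated in full; the proofs are below) =====
def Claim_equal_check_facts_py : Prop := ∀ (facts : List (String × List String)) (bp_text : String), Dom_check_facts_py facts bp_text → Pre_check_facts_py facts bp_text → Spec_check_facts_py facts bp_text (check_facts_py facts bp_text)

-- ===== LEMMAS AND PROOFS =====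

-- the per-item contribution both programs make
def pvItem (bp c it : String) : List String :=
  match pvLabelOf c with
  | some l => if PySem.Str.isIn (pvPatternOf c it) bp then [] else [l ++ it]
  | none => []

theorem pvAStep_eq (bp c : String) (m : List String) (it : String) :
    pvAStep bp c m it = m ++ pvItem bp c it := by
  unfold pvAStep pvItem pvLabelOf pvPatternOf
  by_cases hc : c == "enums"
  · simp only [hc, if_true]
    rcases h : PySem.List.pyGet? ((PySem.Str.split? it ".").getD []) (-1) with _ | member
    · simp

    · simp only [Option.getD_some]
      by_cases hm : PySem.Chars.isIn member.toList bp.toList = true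
      · simp [hm]
      · simp [hm]
  · simp only [hc, if_false, Bool.false_eq_true]
    by_cases he : c == "endpoints"
    · simp only [he, if_true]
      rcases h : PySem.List.pyGet? ((PySem.Str.splitMax? it " " 1).getD []) 1 with _ | path
      · simp

      · simp only [Option.getD_some]
        by_cases hp : PySem.Chars.isIn path.toList bp.toList = true
        · simp [hp]
        · simp [hp]
    · simp only [he, if_false, Bool.false_eq_true]
      by_cases hk : c == "constants"
      · simp only [hk, if_true]
        by_cases hi : PySem.Chars.isIn it.toList bp.toList = true
        · simp [hi]
        · simp [hi]
      · simp [hk]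

theorem pvInnerA_eq (bp c : String) (its : List String) (m : List String) :
    its.foldl (pvAStep bp c) m = m ++ its.flatMap (pvItem bp c) := by
  have h : its.foldl (pvAStep bp c) m
      = its.foldl (fun acc x => acc ++ pvItem bp c x) m := by
    congr 1
    funext acc x
    exact pvAStep_eq bp c acc x
  rw [h, PySem.List.foldl_append_eq_flatMap]

theorem pvA_eq_flatMap (facts : List (String × List String)) (bp : String) :
    check_facts_py facts bp
      = facts.flatMap (fun ci => ci.2.flatMap (pvItem bp ci.1)) := by
  unfold check_facts_py
  suffices h : ∀ (fs : List (String × List String)) (acc : List String),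
      fs.foldl (fun missing ci => ci.2.foldl (pvAStep bp ci.1) missing) acc
        = acc ++ fs.flatMap (fun ci => ci.2.flatMap (pvItem bp ci.1)) by
    simpa using h facts []
  intro fs
  induction fs with
  | nil => intro acc; simp
  | cons ci fs ih =>
      intro acc
      rw [List.foldl_cons, pvInnerA_eq, ih, List.flatMap_cons, List.append_assoc]

-- the memo dict of B: every key it ever holds maps to its substring test,
-- and every pattern of the processed triples is present
theorem pvFound_get? (bp : String) (ts : List (String × String × String))
    (d : PySem.Dict String Bool)
    (hP : ∀ k v, d.get? k = some v → v = PySem.Str.isIn k bp) (p : String)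
    (hp : p ∈ ts.map (fun t => t.2.2) ∨ (d.get? p).isSome) :
    (ts.foldl (fun d t =>
        if (d.get? t.2.2).isSome then d
        else d.insert t.2.2 (PySem.Str.isIn t.2.2 bp)) d).get? p
      = some (PySem.Str.isIn p bp) := by
  induction ts generalizing d with
  | nil =>
      rcases hp with h | h
      · simp at h
      · rcases Option.isSome_iff_exists.mp h with ⟨v, hv⟩
        simp only [List.foldl_nil, hv, hP p v hv]
  | cons t ts ih =>
      simp only [List.foldl_cons]
      apply ih
      · intro k v hv
        by_cases hs : (d.get? t.2.2).isSome
        · rw [if_pos hs] at hv; exact hP k v hv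
        · rw [if_neg hs, PySem.Dict.get?_insert] at hv
          by_cases hk : k = t.2.2
          · rw [if_pos hk] at hv; rw [hk]; exact (Option.some_inj.mp hv).symm
          · rw [if_neg hk] at hv; exact hP k v hv
      · rcases hp with h | h
        · simp only [List.map_cons, List.mem_cons] at h
          rcases h with h | h
          · right
            by_cases hs : (d.get? t.2.2).isSome
            · rw [if_pos hs, h]; exact hs
            · rw [if_neg hs, h, PySem.Dict.get?_insert_self]; simp
          · left; exact h
        · right
          by_cases hs : (d.get? t.2.2).isSome
          · rw [if_pos hs]; exact h
          · rw [if_neg hs, PySem.Dict.get?_insert]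
            by_cases hk : p = t.2.2
            · simp [hk]
            · rw [if_neg hk]; exact h

-- flatMap of a []-or-singleton function is a filterMap
theorem pvFlatMap_eq_filterMap {α β : Type} (l : List α) (g : α → List β)
    (f : α → Option β) (h : ∀ a ∈ l, g a = (f a).toList) :
    l.flatMap g = l.filterMap f := by
  induction l with
  | nil => simp
  | cons a l ih =>
      simp only [List.flatMap_cons, List.filterMap_cons]
      rcases hf : f a with _ | b
      · rw [h a (List.mem_cons_self), hf]
        simpa using ih (fun a ha => h a (List.mem_cons_of_mem _ ha))
      · rw [h a (List.mem_cons_self), hf]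
        simp only [Option.toList_some, List.singleton_append, List.cons.injEq, true_and]
        exact ih (fun a ha => h a (List.mem_cons_of_mem _ ha))

theorem pvB_eq_flatMap (facts : List (String × List String)) (bp : String) :
    check_facts_py_alt facts bp
      = facts.flatMap (fun ci => ci.2.flatMap (pvItem bp ci.1)) := by
  unfold check_facts_py_alt
  simp only []
  set triples := facts.flatMap (fun ci =>
    match pvLabelOf ci.1 with
    | some label => ci.2.map (fun item => (label, item, pvPatternOf ci.1 item))
    | none => []) with htriples
  -- the memoised lookups agree with the direct substring test
  have hmemo : triples.filterMap (fun t =>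
      if (triples.foldl (fun d t =>
            if (d.get? t.2.2).isSome then d
            else d.insert t.2.2 (PySem.Str.isIn t.2.2 bp)) PySem.Dict.empty).getD t.2.2 true = false
      then some (t.1 ++ t.2.1) else none)
    = triples.filterMap (fun t =>
      if PySem.Str.isIn t.2.2 bp = false then some (t.1 ++ t.2.1) else none) := by
    apply List.filterMap_congr
    intro t ht
    have hget := pvFound_get? bp triples PySem.Dict.empty
      (by intro k v hv; simp [PySem.Dict.get?_empty] at hv) t.2.2
      (Or.inl (List.mem_map_of_mem ht))
    rw [PySem.Dict.getD_eq_get?_getD, hget, Option.getD_some]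
  rw [hmemo, htriples, List.filterMap_flatMap]
  congr 1
  funext ci
  rcases hl : pvLabelOf ci.1 with _ | l
  · simp [hl, pvItem]
  · simp only [List.filterMap_map]
    refine (pvFlatMap_eq_filterMap ci.2 (pvItem bp ci.1) _ ?_).symm
    intro it _
    unfold pvItem
    rw [hl]
    by_cases hi : PySem.Chars.isIn (pvPatternOf ci.1 it).toList bp.toList = true
    · simp [hi]
    · simp [hi]

theorem check_facts_py_spec : Claim_equal_check_facts_py := by
  intro facts bp _ _
  unfold Spec_check_facts_py
  rw [pvA_eq_flatMap, pvB_eq_flatMap]
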